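-- pv_equiv track=rewrite | github.com/smashem123/EagleEye | eagleeye/sources/pyopdb.py | _estimate_location
-- ===== SOURCE A (Python) =====
-- def _estimate_location(domain: str) -> str:
--     """Estimate location from domain TLD and patterns"""
--     domain_lower = domain.lower()
--
--     # Country-specific TLDs
--     tld_map = {
--         '.uk': 'United Kingdom', '.de': 'Germany', '.fr': 'France',
--         '.ca': 'Canada', '.au': 'Australia', '.jp': 'Japan',
--         '.cn': 'China', '.ru': 'Russia', '.br': 'Brazil',
--         '.in': 'India', '.mx': 'Mexico', '.it': 'Italy'
--     }
--
--     for tld, country in tld_map.items():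
--         if domain_lower.endswith(tld):
--             return country
--
--     # Default for common TLDs
--     if any(domain_lower.endswith(tld) for tld in ['.com', '.net', '.org']):
--         return 'United States'
--
--     return 'Unknown'
-- ===== SOURCE B (Python) =====
-- _COUNTRY = {
--     'uk': 'United Kingdom', 'de': 'Germany', 'fr': 'France',
--     'ca': 'Canada', 'au': 'Australia', 'jp': 'Japan',
--     'cn': 'China', 'ru': 'Russia', 'br': 'Brazil',
--     'in': 'India', 'mx': 'Mexico', 'it': 'Italy',
--     'com': 'United States', 'net': 'United States', 'org': 'United States',
-- }
--
--
-- def _estimate_location(domain: str) -> str: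
--     """Estimate location from domain TLD and patterns"""
--     domain_lower = domain.lower()
--     if '.' not in domain_lower:
--         return 'Unknown'
--     # extract the bare label after the last dot once, then one dict lookup
--     return _COUNTRY.get(domain_lower.rsplit('.', 1)[1], 'Unknown')
-- ===== Notes on version B (the rewrite author's own statement) =====
-- stated objective: simpler
-- what changed: Instead of scanning the TLD map with repeated endswith suffix tests, B extracts the bare label after the last dot once and does a single dict lookup keyed by that label.
import Mathlib
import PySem

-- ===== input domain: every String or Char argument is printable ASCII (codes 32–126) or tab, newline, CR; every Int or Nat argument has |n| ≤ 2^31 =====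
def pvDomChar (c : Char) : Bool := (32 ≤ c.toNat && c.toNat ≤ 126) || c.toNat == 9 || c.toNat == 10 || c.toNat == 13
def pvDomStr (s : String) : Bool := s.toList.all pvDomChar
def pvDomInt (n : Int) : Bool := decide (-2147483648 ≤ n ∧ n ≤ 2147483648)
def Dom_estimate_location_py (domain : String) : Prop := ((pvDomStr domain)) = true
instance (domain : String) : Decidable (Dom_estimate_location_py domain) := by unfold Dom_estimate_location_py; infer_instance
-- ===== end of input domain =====

-- B replaces A's repeated endswith scan over the TLD map by extracting the bare label after
-- the last dot once and doing a single dict lookup keyed by that label (objective: simpler).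

-- ===== PORT A =====
-- tld_map as an association list in insertion order (string literals as char lists)
def pvTldMapA : List (List Char × String) :=
  [(['.','u','k'], "United Kingdom"), (['.','d','e'], "Germany"), (['.','f','r'], "France"),
   (['.','c','a'], "Canada"), (['.','a','u'], "Australia"), (['.','j','p'], "Japan"),
   (['.','c','n'], "China"), (['.','r','u'], "Russia"), (['.','b','r'], "Brazil"),
   (['.','i','n'], "India"), (['.','m','x'], "Mexico"), (['.','i','t'], "Italy")]

-- the 'for tld, country in tld_map.items(): if domain_lower.endswith(tld): return country' loop
def pvALoop (d : List Char) : List (List Char × String) → Option String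
  | [] => none
  | (tld, country) :: rest =>
      if PySem.Chars.endswith d tld then some country else pvALoop d rest

def estimate_location_py (domain : String) : String :=
  let domain_lower := PySem.Chars.lower domain.toList
  match pvALoop domain_lower pvTldMapA with
  | some country => country
  | none =>
      if [['.','c','o','m'], ['.','n','e','t'], ['.','o','r','g']].any
           (fun tld => PySem.Chars.endswith domain_lower tld) then
        "United States"
      else
        "Unknown"

-- ===== PORT B =====
-- _COUNTRY: bare labels → countries (module-level dict of B, keyed by String)
def pvCountry : PySem.Dict String String :=
  PySem.Dict.mk
    [("uk", "United Kingdom"), ("de", "Germany"), ("fr", "France"),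
     ("ca", "Canada"), ("au", "Australia"), ("jp", "Japan"),
     ("cn", "China"), ("ru", "Russia"), ("br", "Brazil"),
     ("in", "India"), ("mx", "Mexico"), ("it", "Italy"),
     ("com", "United States"), ("net", "United States"), ("org", "United States")]

-- hand port of s.rsplit('.', 1)[1] for an s containing '.': exactly the characters after the
-- last '.' (taken from the reversed code-point list; exact for any string with a dot)
def pvRsplitTail (s : String) : String :=
  String.ofList ((s.toList.reverse.takeWhile (fun c => c != '.')).reverse)

def estimate_location_py_alt (domain : String) : String :=
  let domain_lower := PySem.Str.lower domain
  if PySem.Str.isIn "." domain_lower then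
    pvCountry.getD (pvRsplitTail domain_lower) "Unknown"
  else
    "Unknown"

-- ===== PRECONDITION & SPEC =====
def Spec_estimate_location_py (domain : String) (out : String) : Prop := out = estimate_location_py_alt domain
instance (domain : String) (out : String) : Decidable (Spec_estimate_location_py domain out) := by unfold Spec_estimate_location_py; infer_instance

-- ===== CLAIM (what is proved, stated in full; the proofs are below) =====
def Claim_equal_estimate_location_py : Prop := ∀ (domain : String), Dom_estimate_location_py domain → Spec_estimate_location_py domain (estimate_location_py domain)

-- ===== LEMMAS AND PROOFS =====

-- the dot-free tail after the last '.' of d, as a char list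
def pvAfterLastDot (d : List Char) : List Char :=
  (d.reverse.takeWhile (fun c => c != '.')).reverse

-- prefix characterisation on the reversed list: v ++ ['.'] is a prefix of r iff r contains a
-- dot and its dot-free initial segment is exactly v
lemma pv_prefix_iff (v : List Char) (hv : '.' ∉ v) :
    ∀ r : List Char, ((v ++ ['.']) <+: r) ↔ ('.' ∈ r ∧ r.takeWhile (fun c => c != '.') = v) := by
  induction v with
  | nil =>
    intro r
    cases r with
    | nil => simp
    | cons c t =>
      constructor
      · rintro h
        rcases List.cons_prefix_cons.mp h with ⟨rfl, -⟩
        simp [List.takeWhile]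
      · rintro ⟨hm, ht⟩
        simp only [List.takeWhile] at ht
        by_cases hc : (c != '.') = true
        · simp [hc] at ht
        · have : c = '.' := by simpa using hc
          subst this
          exact ⟨t, rfl⟩
  | cons a v' ih =>
    intro r
    have ha : a ≠ '.' := by simp at hv; tauto
    have hv' : '.' ∉ v' := by simp at hv; tauto
    cases r with
    | nil => simp
    | cons c t =>
      constructor
      · intro h
        rcases List.cons_prefix_cons.mp h with ⟨rfl, h2⟩
        rcases (ih hv' t).mp h2 with ⟨hm, ht⟩
        refine ⟨by simp [hm], ?_⟩
        have hab : (a != '.') = true := by simp [ha]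
        simp [List.takeWhile, hab, ht]
      · rintro ⟨hm, ht⟩
        simp only [List.takeWhile] at ht
        by_cases hc : (c != '.') = true
        · simp only [hc] at ht
          have hca : c = a := (List.cons.injEq _ _ _ _ ▸ ht).1
          subst hca
          have hm' : '.' ∈ t := by
            rcases List.mem_cons.mp hm with h | h
            · exact absurd h.symm ha
            · exact h
          exact List.cons_prefix_cons.mpr ⟨rfl, (ih hv' t).mpr ⟨hm', (List.cons.injEq _ _ _ _ ▸ ht).2⟩⟩
        · simp [hc] at ht

-- endswith with a '.'-prefixed dot-free word, characterised via pvAfterLastDot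
lemma pv_endswith_iff (d w : List Char) (hw : '.' ∉ w) :
    PySem.Chars.endswith d ('.' :: w) = true ↔ ('.' ∈ d ∧ pvAfterLastDot d = w) := by
  rw [PySem.Chars.endswith_iff]
  rw [← List.reverse_prefix]
  have : ('.' :: w).reverse = w.reverse ++ ['.'] := by simp
  rw [this, pv_prefix_iff w.reverse (by simpa using hw) d.reverse]
  unfold pvAfterLastDot
  constructor
  · rintro ⟨hm, ht⟩
    exact ⟨by simpa using hm, by rw [ht]; simp⟩
  · rintro ⟨hm, ht⟩
    refine ⟨by simpa using hm, ?_⟩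
    have := congrArg List.reverse ht
    simpa using this

lemma pv_endswith_false (d w : List Char) (hd : '.' ∉ d) :
    PySem.Chars.endswith d ('.' :: w) = false := by
  by_contra h
  have h2 : PySem.Chars.endswith d ('.' :: w) = true := by simpa using h
  have h3 : ('.' :: w) <:+ d := (PySem.Chars.endswith_iff d ('.' :: w)).mp h2
  exact hd (h3.subset (by simp))

-- Boolean form under the presence of a dot
lemma pv_endswith_eq (d w : List Char) (hw : '.' ∉ w) (hd : '.' ∈ d) :
    PySem.Chars.endswith d ('.' :: w) = (String.ofList w == String.ofList (pvAfterLastDot d)) := by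
  by_cases h : pvAfterLastDot d = w
  · rw [(pv_endswith_iff d w hw).mpr ⟨hd, h⟩]
    simp [h]
  · have hne : ¬ PySem.Chars.endswith d ('.' :: w) = true :=
      fun hE => h ((pv_endswith_iff d w hw).mp hE).2
    rw [Bool.not_eq_true] at hne
    rw [hne]
    have hne2 : String.ofList w ≠ String.ofList (pvAfterLastDot d) := by
      intro he
      have hw2 : w = pvAfterLastDot d := by
        have h3 := congrArg String.toList he
        simpa using h3
      exact h hw2.symm
    simp [hne2]

lemma pv_isIn_dot (d : List Char) : PySem.Chars.isIn ['.'] d = true ↔ '.' ∈ d := by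
  rw [PySem.Chars.isIn_iff_infix]
  constructor
  · intro h
    exact h.sublist.subset (by simp)
  · intro h
    rcases List.append_of_mem h with ⟨s, t, rfl⟩
    exact ⟨s, t, by simp⟩

-- pvRsplitTail on a String whose char list is d
lemma pv_rsplitTail_toList (s : String) : pvRsplitTail s = String.ofList (pvAfterLastDot s.toList) := rfl

-- core equality on the lowered character list
lemma pv_core (d : List Char) :
    (match pvALoop d pvTldMapA with
     | some country => country
     | none =>
        if [['.','c','o','m'], ['.','n','e','t'], ['.','o','r','g']].any
             (fun tld => PySem.Chars.endswith d tld) then "United States" else "Unknown")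
    = (if PySem.Chars.isIn ['.'] d then
         pvCountry.getD (String.ofList (pvAfterLastDot d)) "Unknown"
       else "Unknown") := by
  by_cases hd : '.' ∈ d
  · have hIn : PySem.Chars.isIn ['.'] d = true := (pv_isIn_dot d).mpr hd
    simp only [pvALoop, pvTldMapA, pvCountry, List.any_cons, List.any_nil, hIn, if_true,
      PySem.Dict.getD_eq_get?_getD, PySem.Dict.get?_mk_cons,
      pv_endswith_eq d ['u','k'] (by decide) hd,
      pv_endswith_eq d ['d','e'] (by decide) hd,
      pv_endswith_eq d ['f','r'] (by decide) hd,
      pv_endswith_eq d ['c','a'] (by decide) hd,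
      pv_endswith_eq d ['a','u'] (by decide) hd,
      pv_endswith_eq d ['j','p'] (by decide) hd,
      pv_endswith_eq d ['c','n'] (by decide) hd,
      pv_endswith_eq d ['r','u'] (by decide) hd,
      pv_endswith_eq d ['b','r'] (by decide) hd,
      pv_endswith_eq d ['i','n'] (by decide) hd,
      pv_endswith_eq d ['m','x'] (by decide) hd,
      pv_endswith_eq d ['i','t'] (by decide) hd,
      pv_endswith_eq d ['c','o','m'] (by decide) hd,
      pv_endswith_eq d ['n','e','t'] (by decide) hd,
      pv_endswith_eq d ['o','r','g'] (by decide) hd]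
    set k := String.ofList (pvAfterLastDot d) with hk
    by_cases h1 : "uk" = k
    · simp [h1]
    by_cases h2 : "de" = k
    · simp [h1, h2]
    by_cases h3 : "fr" = k
    · simp [h1, h2, h3]
    by_cases h4 : "ca" = k
    · simp [h1, h2, h3, h4]
    by_cases h5 : "au" = k
    · simp [h1, h2, h3, h4, h5]
    by_cases h6 : "jp" = k
    · simp [h1, h2, h3, h4, h5, h6]
    by_cases h7 : "cn" = k
    · simp [h1, h2, h3, h4, h5, h6, h7]
    by_cases h8 : "ru" = k
    · simp [h1, h2, h3, h4, h5, h6, h7, h8]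
    by_cases h9 : "br" = k
    · simp [h1, h2, h3, h4, h5, h6, h7, h8, h9]
    by_cases h10 : "in" = k
    · simp [h1, h2, h3, h4, h5, h6, h7, h8, h9, h10]
    by_cases h11 : "mx" = k
    · simp [h1, h2, h3, h4, h5, h6, h7, h8, h9, h10, h11]
    by_cases h12 : "it" = k
    · simp [h1, h2, h3, h4, h5, h6, h7, h8, h9, h10, h11, h12]
    by_cases h13 : "com" = k
    · simp [h1, h2, h3, h4, h5, h6, h7, h8, h9, h10, h11, h12, h13]
    by_cases h14 : "net" = k
    · simp [h1, h2, h3, h4, h5, h6, h7, h8, h9, h10, h11, h12, h13, h14]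
    by_cases h15 : "org" = k
    · simp [h1, h2, h3, h4, h5, h6, h7, h8, h9, h10, h11, h12, h13, h14, h15]
    simp [h1, h2, h3, h4, h5, h6, h7, h8, h9, h10, h11, h12, h13, h14, h15, PySem.Dict.get?]
  · have hIn : PySem.Chars.isIn ['.'] d = false := by
      rcases Bool.eq_false_or_eq_true (PySem.Chars.isIn ['.'] d) with h | h
      · exact absurd ((pv_isIn_dot d).mp h) hd
      · exact h
    simp [pvALoop, pvTldMapA, hIn, fun w => pv_endswith_false d w hd]

-- bridge the String-level B to the char-list core
lemma pv_alt_eq (domain : String) :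
    estimate_location_py_alt domain
    = (if PySem.Chars.isIn ['.'] (PySem.Chars.lower domain.toList) then
         pvCountry.getD (String.ofList (pvAfterLastDot (PySem.Chars.lower domain.toList))) "Unknown"
       else "Unknown") := by
  show (if PySem.Str.isIn "." (PySem.Str.lower domain) = true then
          pvCountry.getD (pvRsplitTail (PySem.Str.lower domain)) "Unknown"
        else "Unknown") = _
  rw [pv_rsplitTail_toList]
  have h1 : (PySem.Str.lower domain).toList = PySem.Chars.lower domain.toList :=
    PySem.Str.toList_lower domain
  have h2 : PySem.Str.isIn "." (PySem.Str.lower domain)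
      = PySem.Chars.isIn ['.'] (PySem.Chars.lower domain.toList) := by
    rw [PySem.Str.isIn_eq, h1]; rfl
  rw [h2]
  unfold pvAfterLastDot
  rw [h1]

-- ===== VERDICT (by name: the statement is the Claim_ definition above) =====
theorem estimate_location_py_spec : Claim_equal_estimate_location_py := by
  intro domain _
  unfold Spec_estimate_location_py estimate_location_py
  rw [pv_alt_eq]
  exact pv_core (PySem.Chars.lower domain.toList)
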